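-- pv_equiv track=rewrite | github.com/anonymous-9090/Deep-INT | other_algo/INT_balance.py | split_eulerian_cycle
-- ===== SOURCE A (Python) =====
-- def split_eulerian_cycle(eulerian_cycle, removed_nodes, current_graph_nodes):
--     """Splits an Eulerian cycle into segments based on removed nodes and edges."""
--     split_cycles = []
--     current_cycle = []
--
--     for node in eulerian_cycle:
--         current_cycle.append(node)
--         if node in removed_nodes and node in current_graph_nodes and len(current_cycle) > 1:
--             split_cycles.append(current_cycle)
--             current_cycle = [node]
--
--     if len(current_cycle) > 1:
--         split_cycles.append(current_cycle)
--
--     return split_cycles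
-- ===== SOURCE B (Python) =====
-- def split_eulerian_cycle(eulerian_cycle, removed_nodes, current_graph_nodes):
--     """Splits an Eulerian cycle into segments based on removed nodes and edges."""
--     cuts = [i for i, node in enumerate(eulerian_cycle)
--             if i > 0 and node in removed_nodes and node in current_graph_nodes]
--     segments = []
--     start = 0
--     for c in cuts:
--         segments.append(eulerian_cycle[start:c + 1])
--         start = c
--     tail = eulerian_cycle[start:]
--     if len(tail) > 1:
--         segments.append(tail)
--     return segments
-- ===== Notes on version B (the rewrite author's own statement) =====
-- stated objective: alternative
-- what changed: Replaces A's single pass with a running current_cycle accumulator by two passes: first collect the boundary indices (i>0 with node in both sets), then emit each segment as a slice between consecutive boundaries, sharing the boundary node, plus the tail if longer than 1.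
import Mathlib
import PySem

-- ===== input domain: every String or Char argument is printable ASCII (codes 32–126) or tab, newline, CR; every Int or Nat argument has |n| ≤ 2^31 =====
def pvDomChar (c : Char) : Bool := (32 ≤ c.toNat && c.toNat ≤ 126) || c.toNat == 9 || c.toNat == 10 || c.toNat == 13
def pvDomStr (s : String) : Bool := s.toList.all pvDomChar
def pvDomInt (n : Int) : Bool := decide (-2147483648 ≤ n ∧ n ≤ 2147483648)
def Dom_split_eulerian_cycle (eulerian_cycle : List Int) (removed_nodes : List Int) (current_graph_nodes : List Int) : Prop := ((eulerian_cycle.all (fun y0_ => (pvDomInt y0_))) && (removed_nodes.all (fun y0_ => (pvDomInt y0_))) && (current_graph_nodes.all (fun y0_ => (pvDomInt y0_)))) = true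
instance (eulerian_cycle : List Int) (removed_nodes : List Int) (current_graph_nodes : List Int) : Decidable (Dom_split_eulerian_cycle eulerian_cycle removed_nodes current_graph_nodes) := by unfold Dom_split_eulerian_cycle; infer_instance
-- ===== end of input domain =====

-- B replaces A's running current_cycle accumulator by two passes: collect the
-- boundary indices first, then emit the segments as slices (objective: alternative).

-- ===== PORT A =====
-- loop body of A's for-loop, extracted as a helper
def stepA (removed_nodes current_graph_nodes : List Int)
    (st : List (List Int) × List Int) (node : Int) : List (List Int) × List Int :=
  let cur := st.2 ++ [node]
  if node ∈ removed_nodes ∧ node ∈ current_graph_nodes ∧ 1 < cur.length then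
    (st.1 ++ [cur], [node])
  else
    (st.1, cur)

def split_eulerian_cycle (eulerian_cycle : List Int) (removed_nodes : List Int) (current_graph_nodes : List Int) : List (List Int) :=
  let st := eulerian_cycle.foldl (stepA removed_nodes current_graph_nodes) ([], [])
  if 1 < st.2.length then st.1 ++ [st.2] else st.1

-- ===== PORT B =====
-- loop body of B's for-loop over the cut indices
def stepB (eulerian_cycle : List Int) (st : List (List Int) × Int) (c : Int) :
    List (List Int) × Int :=
  (st.1 ++ [PySem.List.slice eulerian_cycle (some st.2) (some (c + 1))], c)

def split_eulerian_cycle_alt (eulerian_cycle : List Int) (removed_nodes : List Int) (current_graph_nodes : List Int) : List (List Int) :=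
  let cuts := ((PySem.List.enumerate eulerian_cycle 0).filter
      (fun p => decide (0 < p.1 ∧ p.2 ∈ removed_nodes ∧ p.2 ∈ current_graph_nodes))).map Prod.fst
  let st := cuts.foldl (stepB eulerian_cycle) ([], 0)
  let tail := PySem.List.slice eulerian_cycle (some st.2) none
  if 1 < tail.length then st.1 ++ [tail] else st.1

-- ===== PRECONDITION & SPEC =====
def Spec_split_eulerian_cycle (eulerian_cycle : List Int) (removed_nodes : List Int) (current_graph_nodes : List Int) (out : List (List Int)) : Prop := out = split_eulerian_cycle_alt eulerian_cycle removed_nodes current_graph_nodes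
instance (eulerian_cycle : List Int) (removed_nodes : List Int) (current_graph_nodes : List Int) (out : List (List Int)) : Decidable (Spec_split_eulerian_cycle eulerian_cycle removed_nodes current_graph_nodes out) := by unfold Spec_split_eulerian_cycle; infer_instance

-- ===== CLAIM (what is proved, stated in full; the proofs are below) =====
def Claim_equal_split_eulerian_cycle : Prop := ∀ (eulerian_cycle : List Int) (removed_nodes : List Int) (current_graph_nodes : List Int), Dom_split_eulerian_cycle eulerian_cycle removed_nodes current_graph_nodes → Spec_split_eulerian_cycle eulerian_cycle removed_nodes current_graph_nodes (split_eulerian_cycle eulerian_cycle removed_nodes current_graph_nodes)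

-- ===== LEMMAS AND PROOFS =====

-- recursive characterisation of A's loop
def goA (removed_nodes current_graph_nodes : List Int) : List Int → List Int → List (List Int)
  | cur, [] => if 1 < cur.length then [cur] else []
  | cur, x :: rest =>
      if x ∈ removed_nodes ∧ x ∈ current_graph_nodes ∧ 1 < (cur ++ [x]).length then
        (cur ++ [x]) :: goA removed_nodes current_graph_nodes [x] rest
      else
        goA removed_nodes current_graph_nodes (cur ++ [x]) rest

-- the cut indices of a suffix, Nat-indexed
def cutsN (removed_nodes current_graph_nodes : List Int) : Nat → List Int → List Nat
  | _, [] => []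
  | k, x :: rest =>
      if 0 < k ∧ x ∈ removed_nodes ∧ x ∈ current_graph_nodes then
        k :: cutsN removed_nodes current_graph_nodes (k + 1) rest
      else
        cutsN removed_nodes current_graph_nodes (k + 1) rest

-- recursive characterisation of B's slicing loop, Nat-indexed
def tailSegsN (ec : List Int) : List Nat → Nat → List (List Int)
  | [], start => if 1 < (ec.drop start).length then [ec.drop start] else []
  | c :: cs, start => (ec.drop start).take (c + 1 - start) :: tailSegsN ec cs c

theorem foldA_eq (rm gr : List Int) : ∀ (xs : List Int) (acc : List (List Int)) (cur : List Int),
    (let st := xs.foldl (stepA rm gr) (acc, cur)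
     if 1 < st.2.length then st.1 ++ [st.2] else st.1) = acc ++ goA rm gr cur xs := by
  intro xs
  induction xs with
  | nil => intro acc cur; simp [goA]; split <;> simp
  | cons x rest ih =>
      intro acc cur
      simp only [List.foldl_cons, stepA, goA]
      by_cases h : x ∈ rm ∧ x ∈ gr ∧ 1 < (cur ++ [x]).length
      · simp only [if_pos h, ih]
        simp
      · simp only [if_neg h, ih]

theorem cuts_eq (rm gr : List Int) : ∀ (xs : List Int) (s : Nat),
    ((PySem.List.enumerate xs (s : Int)).filter
        (fun p => decide (0 < p.1 ∧ p.2 ∈ rm ∧ p.2 ∈ gr))).map Prod.fst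
      = (cutsN rm gr s xs).map (Nat.cast : Nat → Int) := by
  intro xs
  induction xs with
  | nil => intro s; simp [PySem.List.enumerate_nil, cutsN]
  | cons x rest ih =>
      intro s
      rw [PySem.List.enumerate_cons]
      have hs : (s : Int) + 1 = ((s + 1 : Nat) : Int) := by push_cast; ring
      by_cases h : 0 < s ∧ x ∈ rm ∧ x ∈ gr
      · have hb : (decide ((0 : Int) < (s : Int) ∧ x ∈ rm ∧ x ∈ gr)) = true :=
          decide_eq_true ⟨by exact_mod_cast h.1, h.2⟩
        simp only [List.filter_cons, hb, if_true, List.map_cons, hs, ih, cutsN, if_pos h]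
      · have hb : (decide ((0 : Int) < (s : Int) ∧ x ∈ rm ∧ x ∈ gr)) = false :=
          decide_eq_false (fun hc => h ⟨by exact_mod_cast hc.1, hc.2⟩)
        simp only [List.filter_cons, hb, Bool.false_eq_true, if_false, hs, ih, cutsN, if_neg h]

theorem foldB_eq (ec : List Int) : ∀ (cs : List Nat) (acc : List (List Int)) (start : Nat),
    (let st := (cs.map (Nat.cast : Nat → Int)).foldl (stepB ec) (acc, (start : Int))
     let tail := PySem.List.slice ec (some st.2) none
     if 1 < tail.length then st.1 ++ [tail] else st.1) = acc ++ tailSegsN ec cs start := by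
  intro cs
  induction cs with
  | nil =>
      intro acc start
      simp [tailSegsN, PySem.List.slice_from_natCast]
      split <;> simp
  | cons c cs ih =>
      intro acc start
      have hc : (c : Int) + 1 = ((c + 1 : Nat) : Int) := by push_cast; ring
      simp only [List.map_cons, List.foldl_cons, stepB, tailSegsN, hc,
        PySem.List.slice_natCast, ih]
      simp

theorem main_eq (ec rm gr : List Int) : ∀ (xs : List Int) (k start : Nat),
    ec.drop k = xs → start < k →
    goA rm gr ((ec.drop start).take (k - start)) xs
      = tailSegsN ec (cutsN rm gr k xs) start := by
  intro xs
  induction xs with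
  | nil =>
      intro k start hdrop hlt
      have hlen : ec.length ≤ k := List.drop_eq_nil_iff.mp hdrop
      have htake : (ec.drop start).take (k - start) = ec.drop start := by
        apply List.take_of_length_le; simp; omega
      simp [goA, cutsN, tailSegsN, htake]
  | cons x rest ih =>
      intro k start hdrop hlt
      have hk : k < ec.length := by
        by_contra hc
        rw [List.drop_eq_nil_iff.mpr (by omega)] at hdrop
        simp at hdrop
      have hx : ec[k]? = some x := by
        have : (ec.drop k)[0]? = some x := by rw [hdrop]; rfl
        simpa using this
      have hrest : ec.drop (k + 1) = rest := by
        have ht : (ec.drop k).tail = rest := by rw [hdrop]; rfl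
        rwa [List.tail_drop] at ht
      have hcur : (ec.drop start).take (k + 1 - start)
          = (ec.drop start).take (k - start) ++ [x] := by
        have h1 : k + 1 - start = (k - start) + 1 := by omega
        have h2 : (ec.drop start)[k - start]? = some x := by
          rw [List.getElem?_drop]
          have : start + (k - start) = k := by omega
          rw [this, hx]
        rw [h1, List.take_add_one, h2]
        rfl
      have hlen2 : 1 < ((ec.drop start).take (k - start) ++ [x]).length := by
        simp [List.length_take, List.length_drop]
        omega
      have hpos : 0 < k := by omega
      simp only [goA, cutsN]
      by_cases h : x ∈ rm ∧ x ∈ gr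
      · have hA : x ∈ rm ∧ x ∈ gr ∧ 1 < ((ec.drop start).take (k - start) ++ [x]).length :=
          ⟨h.1, h.2, hlen2⟩
        have hB : 0 < k ∧ x ∈ rm ∧ x ∈ gr := ⟨hpos, h⟩
        rw [if_pos hA, if_pos hB]
        simp only [tailSegsN]
        rw [hcur]
        congr 1
        simpa [hdrop] using ih (k + 1) k hrest (by omega)
      · have hA : ¬ (x ∈ rm ∧ x ∈ gr ∧ 1 < ((ec.drop start).take (k - start) ++ [x]).length) := by
          intro hc; exact h ⟨hc.1, hc.2.1⟩
        have hB : ¬ (0 < k ∧ x ∈ rm ∧ x ∈ gr) := by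
          intro hc; exact h hc.2
        rw [if_neg hA, if_neg hB]
        rw [← hcur]
        exact ih (k + 1) start hrest (by omega)

theorem init_eq (ec rm gr : List Int) :
    goA rm gr [] ec = tailSegsN ec (cutsN rm gr 0 ec) 0 := by
  cases ec with
  | nil => simp [goA, cutsN, tailSegsN]
  | cons x rest =>
      have hA : ¬ (x ∈ rm ∧ x ∈ gr ∧ 1 < (([] : List Int) ++ [x]).length) := by
        simp
      have hB : ¬ (0 < 0 ∧ x ∈ rm ∧ x ∈ gr) := by simp
      simp only [goA, cutsN, if_neg hA, if_neg hB]
      have := main_eq (x :: rest) rm gr rest 1 0 (by simp) (by omega)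
      simpa using this

-- ===== VERDICT (by name: the statement is the Claim_ definition above) =====
theorem split_eulerian_cycle_spec : Claim_equal_split_eulerian_cycle := by
  intro ec rm gr _
  unfold Spec_split_eulerian_cycle split_eulerian_cycle split_eulerian_cycle_alt
  have hA := foldA_eq rm gr ec [] []
  simp only at hA
  rw [hA, List.nil_append, init_eq]
  have hc : ((PySem.List.enumerate ec 0).filter
      (fun p => decide (0 < p.1 ∧ p.2 ∈ rm ∧ p.2 ∈ gr))).map Prod.fst
      = (cutsN rm gr 0 ec).map (Nat.cast : Nat → Int) := by
    have := cuts_eq rm gr ec 0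
    simpa using this
  rw [hc]
  have hB := foldB_eq ec (cutsN rm gr 0 ec) [] 0
  simp only at hB
  rw [Nat.cast_zero] at hB
  rw [hB, List.nil_append]
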